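-- pv_equiv track=rewrite | github.com/Nitish252000/LeetCode_Solution | Python/Stack/Maximum Score From Removing Substrings.py | remsubstr
-- ===== SOURCE A (Python) =====
-- def remsubstr(s, rem, points):
--     score = 0
--     st = []
--     for i in s:
--         if st and st[-1] == rem[0] and i == rem[1]:
--             st.pop()
--             score=score+points
--         else:
--             st.append(i)
--     # Rebuild the remaining string from the stack
--     remaining = ''.join(st)
--     s=remaining
--
--     return remaining, score
-- ===== SOURCE B (Python) =====
-- def remsubstr(s, rem, points):
--     # Repeated find-and-cut: remove the first occurrence of the 2-char pattern
--     # until none remains; the score is recovered from the total length drop.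
--     pair = rem[0] + rem[1]
--     n = len(s)
--     i = s.find(pair)
--     while i != -1:
--         s = s[:i] + s[i + 2:]
--         i = s.find(pair)
--     return s, ((n - len(s)) // 2) * points
-- ===== Notes on version B (the rewrite author's own statement) =====
-- stated objective: alternative
-- what changed: A's single greedy stack pass is replaced by a repeated find-and-cut loop (delete the first occurrence of rem[0]+rem[1] until none remains) whose score is recovered from the total length drop instead of being counted per pop.
-- outside the precondition, e.g. on remsubstr('bb', 'a', 3): A returns ('bb', 0), B raises IndexError; on remsubstr('x', '', 5): A returns ('x', 0), B raises IndexError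
import Mathlib
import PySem

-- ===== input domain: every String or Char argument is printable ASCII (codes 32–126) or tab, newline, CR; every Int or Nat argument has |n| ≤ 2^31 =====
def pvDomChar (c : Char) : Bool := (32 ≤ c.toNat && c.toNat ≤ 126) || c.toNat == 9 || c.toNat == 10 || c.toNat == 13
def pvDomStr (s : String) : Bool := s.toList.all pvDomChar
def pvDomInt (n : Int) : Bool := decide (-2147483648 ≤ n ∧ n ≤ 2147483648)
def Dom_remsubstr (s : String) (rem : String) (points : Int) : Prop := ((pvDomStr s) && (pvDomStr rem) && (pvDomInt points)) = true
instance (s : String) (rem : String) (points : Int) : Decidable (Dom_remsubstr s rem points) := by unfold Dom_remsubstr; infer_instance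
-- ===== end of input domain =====

-- B replaces A's single greedy stack pass by a repeated find-and-cut loop whose score is
-- recovered from the total length drop (objective: alternative algorithm; not faster).

-- ===== PORT A =====
-- st.append → ++ [c]; st[-1] → pyGet? st (-1); rem[0]/rem[1] → Str.pyGet? (none = IndexError,
-- excluded by Pre_); ''.join(st) → String.ofList.
def remsubstr (s : String) (rem : String) (points : Int) : String × Int :=
  let res := s.toList.foldl
    (fun (acc : Int × List Char) (c : Char) =>
      if acc.2 ≠ [] ∧ PySem.List.pyGet? acc.2 (-1) = PySem.Str.pyGet? rem 0 ∧
          some c = PySem.Str.pyGet? rem 1 then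
        (acc.1 + points, acc.2.dropLast)
      else
        (acc.1, acc.2 ++ [c]))
    (0, [])
  (String.ofList res.2, res.1)

-- ===== PORT B =====
-- s[:i] + s[i+2:] of Source B's loop body
def remAltCut (s : List Char) (i : Int) : List Char :=
  PySem.List.slice s none (some i) ++ PySem.List.slice s (some (i + 2)) none

-- termination lemma for the while loop: each cut removes exactly 2 characters
theorem remAltCut_length (x y : Char) (s : List Char)
    (h : PySem.Chars.find s [x, y] ≠ -1) :
    (remAltCut s (PySem.Chars.find s [x, y])).length + 2 = s.length := by
  have h0 : 0 ≤ PySem.Chars.find s [x, y] := by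
    have := PySem.Chars.neg_one_le_find s [x, y]; omega
  have hle : PySem.Chars.find s [x, y] ≤ (s.length : Int) :=
    PySem.Chars.find_le_length s [x, y]
  have hpre := (PySem.Chars.find_spec h0).1
  have hlen : (PySem.Chars.find s [x, y]).toNat + 2 ≤ s.length := by
    have := hpre.length_le
    simp [List.length_drop] at this
    omega
  unfold remAltCut
  rw [PySem.List.slice_to s h0, PySem.List.slice_from s (by omega : (0:Int) ≤ PySem.Chars.find s [x, y] + 2)]
  have h2 : (PySem.Chars.find s [x, y] + 2).toNat = (PySem.Chars.find s [x, y]).toNat + 2 := by omega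
  simp [h2]
  omega

-- the while loop of Source B: cut the first occurrence of [x,y] until find returns -1
def remAltLoop (x y : Char) (s : List Char) : List Char :=
  if h : PySem.Chars.find s [x, y] ≠ -1 then
    remAltLoop x y (remAltCut s (PySem.Chars.find s [x, y]))
  else s
termination_by s.length
decreasing_by have := remAltCut_length x y s h; omega

def remsubstr_alt (s : String) (rem : String) (points : Int) : String × Int :=
  match PySem.Str.pyGet? rem 0, PySem.Str.pyGet? rem 1 with
  | some x, some y =>
    let n : Int := PySem.Str.len s
    let f := remAltLoop x y s.toList
    (String.ofList f, PySem.Int.floordiv (n - (f.length : Int)) 2 * points)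
  | _, _ => (s, 0)   -- rem[0]+rem[1] raises IndexError in Python here; outside Pre_

-- ===== PRECONDITION & SPEC =====
-- Pre_ excludes rem shorter than 2 characters: there Python B always raises IndexError on
-- rem[0]+rem[1], while A raises the same IndexError only when the stack access is reached
-- and otherwise returns (s, 0) untouched.
def Pre_remsubstr (s : String) (rem : String) (points : Int) : Prop :=
  2 ≤ rem.toList.length
instance (s : String) (rem : String) (points : Int) : Decidable (Pre_remsubstr s rem points) := by
  unfold Pre_remsubstr; infer_instance

def pvWitness_remsubstr : String × String × Int := ("cbaabcab", "ab", 5)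

def Spec_remsubstr (s : String) (rem : String) (points : Int) (out : String × Int) : Prop :=
  out = remsubstr_alt s rem points
instance (s : String) (rem : String) (points : Int) (out : String × Int) : Decidable (Spec_remsubstr s rem points out) := by
  unfold Spec_remsubstr; infer_instance

-- ===== CLAIM (what is proved, stated in full; the proofs are below) =====
def Claim_equal_remsubstr : Prop := ∀ (s : String) (rem : String) (points : Int), Dom_remsubstr s rem points → Pre_remsubstr s rem points → Spec_remsubstr s rem points (remsubstr s rem points)

-- ===== LEMMAS AND PROOFS =====

-- A's loop body, with rem[0] = x, rem[1] = y substituted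
def remStepA (pts : Int) (x y : Char) (acc : Int × List Char) (c : Char) : Int × List Char :=
  if acc.2 ≠ [] ∧ acc.2.getLast? = some x ∧ c = y then
    (acc.1 + pts, acc.2.dropLast)
  else
    (acc.1, acc.2 ++ [c])

theorem stepA_pos (pts : Int) (x y : Char) (st : List Char) (sc : Int) (c : Char)
    (h : st ≠ [] ∧ st.getLast? = some x ∧ c = y) :
    remStepA pts x y (sc, st) c = (sc + pts, st.dropLast) := by
  unfold remStepA; rw [if_pos h]

theorem stepA_neg (pts : Int) (x y : Char) (st : List Char) (sc : Int) (c : Char)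
    (h : ¬ (st ≠ [] ∧ st.getLast? = some x ∧ c = y)) :
    remStepA pts x y (sc, st) c = (sc, st ++ [c]) := by
  unfold remStepA; rw [if_neg h]

theorem foldA_eq_stepA (s rem : String) (pts : Int) (x y : Char) (t : List Char)
    (hrem : rem.toList = x :: y :: t) :
    s.toList.foldl
      (fun (acc : Int × List Char) (c : Char) =>
        if acc.2 ≠ [] ∧ PySem.List.pyGet? acc.2 (-1) = PySem.Str.pyGet? rem 0 ∧
            some c = PySem.Str.pyGet? rem 1 then
          (acc.1 + pts, acc.2.dropLast)
        else
          (acc.1, acc.2 ++ [c])) (0, []) =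
    s.toList.foldl (remStepA pts x y) (0, []) := by
  have hf : (fun (acc : Int × List Char) (c : Char) =>
      if acc.2 ≠ [] ∧ PySem.List.pyGet? acc.2 (-1) = PySem.Str.pyGet? rem 0 ∧
          some c = PySem.Str.pyGet? rem 1 then
        (acc.1 + pts, acc.2.dropLast)
      else
        (acc.1, acc.2 ++ [c])) = remStepA pts x y := by
    funext acc c
    have h0 : PySem.Chars.pyGet? (x :: y :: t) 0 = some x := by
      simp [PySem.Chars.pyGet?, PySem.List.pyGet?, PySem.List.pyIdx?,
        show (0:Int) ≤ (t.length:Int) + 1 by omega]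
    have h1 : PySem.Chars.pyGet? (x :: y :: t) 1 = some y := by
      simp [PySem.Chars.pyGet?, PySem.List.pyGet?, PySem.List.pyIdx?]
    simp only [remStepA, PySem.Str.pyGet?_eq, hrem, PySem.List.pyGet?_neg_one,
      h0, h1, Option.some.injEq, eq_comm]
  rw [hf]

-- the score component is a pass-through accumulator
theorem stepA_score_shift (pts : Int) (x y : Char) (cs : List Char) (st : List Char) (sc d : Int) :
    List.foldl (remStepA pts x y) (sc + d, st) cs =
      ((List.foldl (remStepA pts x y) (sc, st) cs).1 + d,
       (List.foldl (remStepA pts x y) (sc, st) cs).2) := by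
  induction cs generalizing st sc with
  | nil => simp
  | cons c cs ih =>
    simp only [List.foldl_cons]
    by_cases h : st ≠ [] ∧ st.getLast? = some x ∧ c = y
    · rw [stepA_pos pts x y st (sc + d) c h, stepA_pos pts x y st sc c h,
        show sc + d + pts = (sc + pts) + d by ring, ih]
    · rw [stepA_neg pts x y st (sc + d) c h, stepA_neg pts x y st sc c h]
      exact ih _ _

-- if st ++ cs contains no occurrence of [x,y], A's loop just appends everything
theorem foldA_no_occ (pts : Int) (x y : Char) (cs st : List Char) (sc : Int)
    (h : ¬ [x, y] <:+: (st ++ cs)) :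
    List.foldl (remStepA pts x y) (sc, st) cs = (sc, st ++ cs) := by
  induction cs generalizing st sc with
  | nil => simp
  | cons c cs ih =>
    simp only [List.foldl_cons]
    by_cases hc : st ≠ [] ∧ st.getLast? = some x ∧ c = y
    · exfalso
      obtain ⟨hne, hlast, hcy⟩ := hc
      obtain ⟨l', rfl⟩ := List.getLast?_eq_some_iff.mp hlast
      exact h ⟨l', cs, by simp [hcy]⟩
    · rw [stepA_neg pts x y st sc c hc]
      have := ih (st ++ [c]) sc (by simpa using h)
      simpa using this

-- the stack never contains an adjacent occurrence of [x,y]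
theorem stepA_preserves (pts : Int) (x y : Char) (acc : Int × List Char) (c : Char)
    (h : ¬ [x, y] <:+: acc.2) : ¬ [x, y] <:+: (remStepA pts x y acc c).2 := by
  obtain ⟨sc, st⟩ := acc
  by_cases hc : st ≠ [] ∧ st.getLast? = some x ∧ c = y
  · rw [stepA_pos pts x y st sc c hc]
    intro hinf
    exact h (hinf.trans (List.dropLast_prefix st).isInfix)
  · rw [stepA_neg pts x y st sc c hc]
    rintro ⟨u, v, he⟩
    rcases List.eq_nil_or_concat v with rfl | ⟨v', a, rfl⟩
    · simp only [List.append_nil] at he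
      have he' : st ++ [c] = (u ++ [x]) ++ [y] := by simpa [List.append_assoc] using he.symm
      have hlen : st.length = (u ++ [x]).length := by
        have := congrArg List.length he'; simp at this; simp; omega
      obtain ⟨h1, h2⟩ := List.append_inj he' hlen
      apply hc
      refine ⟨by simp [h1], ?_, by simpa using h2⟩
      simp [h1]
    · have he' : st ++ [c] = (u ++ [x, y] ++ v') ++ [a] := by
        simpa [List.append_assoc] using he.symm
      have hlen : st.length = (u ++ [x, y] ++ v').length := by
        have := congrArg List.length he'; simp at this; simp; omega
      obtain ⟨h1, h2⟩ := List.append_inj he' hlen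
      exact h ⟨u, v', by simp [h1]⟩

theorem foldA_preserves (pts : Int) (x y : Char) (cs : List Char) (acc : Int × List Char)
    (h : ¬ [x, y] <:+: acc.2) :
    ¬ [x, y] <:+: (List.foldl (remStepA pts x y) acc cs).2 := by
  induction cs generalizing acc with
  | nil => simpa
  | cons c cs ih => exact ih _ (stepA_preserves pts x y acc c h)

-- feeding the two characters x, y to A's loop returns the stack unchanged, scoring once
theorem foldA_pair (pts : Int) (x y : Char) (st : List Char) (sc : Int)
    (h : ¬ [x, y] <:+: st) :
    List.foldl (remStepA pts x y) (sc, st) [x, y] = (sc + pts, st) := by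
  simp only [List.foldl_cons, List.foldl_nil]
  by_cases hc : st ≠ [] ∧ st.getLast? = some x ∧ x = y
  · -- first character pops
    obtain ⟨hne, hlast, hxy⟩ := hc
    obtain ⟨l', rfl⟩ := List.getLast?_eq_some_iff.mp hlast
    rw [stepA_pos pts x y (l' ++ [x]) sc x ⟨by simp, by simp, hxy⟩, List.dropLast_concat]
    -- second character must push: l' cannot end in x (else [x,x] = [x,y] infix)
    have hl' : ¬ (l' ≠ [] ∧ l'.getLast? = some x ∧ y = y) := by
      rintro ⟨hne', hlast', -⟩
      obtain ⟨l'', rfl⟩ := List.getLast?_eq_some_iff.mp hlast'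
      exact h ⟨l'', [], by simp [hxy]⟩
    rw [stepA_neg pts x y l' (sc + pts) y hl']
    simp [hxy]
  · rw [stepA_neg pts x y st sc x hc,
      stepA_pos pts x y (st ++ [x]) sc y ⟨by simp, by simp, rfl⟩, List.dropLast_concat]

-- cutting one occurrence out of the input costs exactly one score step
theorem foldA_cut (pts : Int) (x y : Char) (u v : List Char) (sc : Int) :
    List.foldl (remStepA pts x y) (sc, []) (u ++ x :: y :: v) =
      ((List.foldl (remStepA pts x y) (sc, []) (u ++ v)).1 + pts,
       (List.foldl (remStepA pts x y) (sc, []) (u ++ v)).2) := by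
  have hni : ¬ [x, y] <:+: (List.foldl (remStepA pts x y) (sc, ([] : List Char)) u).2 :=
    foldA_preserves pts x y u (sc, []) (by simp)
  have hsplit : u ++ x :: y :: v = u ++ [x, y] ++ v := by simp
  rw [hsplit, List.foldl_append, List.foldl_append]
  set acc := List.foldl (remStepA pts x y) (sc, ([] : List Char)) u with hacc
  have : List.foldl (remStepA pts x y) acc [x, y] = (acc.1 + pts, acc.2) := by
    rw [show acc = (acc.1, acc.2) from rfl]
    exact foldA_pair pts x y acc.2 acc.1 hni
  rw [this, stepA_score_shift, List.foldl_append]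

-- find ≠ -1 decomposes s around its first occurrence, and remAltCut deletes it
theorem find_decomp (x y : Char) (s : List Char) (h : PySem.Chars.find s [x, y] ≠ -1) :
    s = s.take (PySem.Chars.find s [x, y]).toNat ++ x :: y ::
          s.drop ((PySem.Chars.find s [x, y]).toNat + 2) ∧
    remAltCut s (PySem.Chars.find s [x, y]) =
      s.take (PySem.Chars.find s [x, y]).toNat ++
        s.drop ((PySem.Chars.find s [x, y]).toNat + 2) := by
  have h0 : 0 ≤ PySem.Chars.find s [x, y] := by
    have := PySem.Chars.neg_one_le_find s [x, y]; omega
  set i := PySem.Chars.find s [x, y] with hi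
  have hpre := (PySem.Chars.find_spec h0).1
  obtain ⟨w, hw⟩ := hpre
  have hdrop2 : s.drop (i.toNat + 2) = w := by
    have : (s.drop i.toNat).drop 2 = w := by rw [← hw]; simp
    simpa [List.drop_drop, Nat.add_comm] using this
  constructor
  · conv_lhs => rw [← List.take_append_drop i.toNat s]
    rw [← hw, hdrop2]
    simp
  · unfold remAltCut
    rw [PySem.List.slice_to s h0, PySem.List.slice_from s (by omega : (0:Int) ≤ i + 2)]
    rw [show (i + 2).toNat = i.toNat + 2 by omega]

theorem remAltLoop_length_le (x y : Char) (s : List Char) :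
    (remAltLoop x y s).length ≤ s.length := by
  fun_induction remAltLoop x y s with
  | case1 s h ih =>
    have := remAltCut_length x y s h
    omega
  | case2 s h => omega

-- the main invariant: A's whole loop equals (score from the length drop, B's loop result)
theorem foldA_loop_aux (pts : Int) (x y : Char) :
    ∀ (n : Nat) (s : List Char), s.length ≤ n → ∀ (sc : Int),
    List.foldl (remStepA pts x y) (sc, []) s =
      (sc + (((s.length - (remAltLoop x y s).length) / 2 : Nat) : Int) * pts,
       remAltLoop x y s) := by
  intro n
  induction n with
  | zero =>
    intro s hs sc
    have hnil : s = [] := by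
      cases s with
      | nil => rfl
      | cons a t => simp at hs
    subst hnil
    have hfind : ¬ PySem.Chars.find ([] : List Char) [x, y] ≠ -1 := by
      simp [PySem.Chars.find_eq_neg_one_iff]
    rw [remAltLoop, dif_neg hfind]
    simp
  | succ n ih =>
    intro s hs sc
    by_cases h : PySem.Chars.find s [x, y] ≠ -1
    · obtain ⟨hdecomp, hcut⟩ := find_decomp x y s h
      have hlen := remAltCut_length x y s h
      have hloop : remAltLoop x y s =
          remAltLoop x y (remAltCut s (PySem.Chars.find s [x, y])) := by
        rw [remAltLoop, dif_pos h]
      set u := s.take (PySem.Chars.find s [x, y]).toNat with hu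
      set w := s.drop ((PySem.Chars.find s [x, y]).toNat + 2) with hw
      have hcutlen : (u ++ w).length + 2 = s.length := by rw [← hcut]; exact hlen
      have hfold1 : List.foldl (remStepA pts x y) (sc, []) s =
          ((List.foldl (remStepA pts x y) (sc, []) (u ++ w)).1 + pts,
           (List.foldl (remStepA pts x y) (sc, []) (u ++ w)).2) := by
        conv_lhs => rw [hdecomp]
        exact foldA_cut pts x y u w sc
      have hih := ih (u ++ w) (by omega) sc
      have hLle := remAltLoop_length_le x y (u ++ w)
      rw [hfold1, hih, hloop, ← hcut]
      refine Prod.ext ?_ rfl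
      simp only
      have harith : (s.length - (remAltLoop x y (remAltCut s (PySem.Chars.find s [x, y]))).length) / 2 =
          ((remAltCut s (PySem.Chars.find s [x, y])).length -
            (remAltLoop x y (remAltCut s (PySem.Chars.find s [x, y]))).length) / 2 + 1 := by
        have hle2 := remAltLoop_length_le x y (remAltCut s (PySem.Chars.find s [x, y]))
        omega
      rw [harith]
      push_cast
      ring
    · have hno : ¬ [x, y] <:+: s :=
        (PySem.Chars.find_eq_neg_one_iff s [x, y]).mp (not_not.mp h)
      rw [remAltLoop, dif_neg h]
      rw [foldA_no_occ pts x y s [] sc (by simpa using hno)]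
      simp

-- Str.pyGet? on the first two characters of rem
theorem rem_get01 (rem : String) (x y : Char) (t : List Char)
    (hrem : rem.toList = x :: y :: t) :
    PySem.Str.pyGet? rem 0 = some x ∧ PySem.Str.pyGet? rem 1 = some y := by
  rw [PySem.Str.pyGet?_eq, PySem.Str.pyGet?_eq, hrem]
  constructor
  · simp [PySem.Chars.pyGet?, PySem.List.pyGet?, PySem.List.pyIdx?,
      show (0:Int) ≤ (t.length:Int) + 1 by omega]
  · simp [PySem.Chars.pyGet?, PySem.List.pyGet?, PySem.List.pyIdx?]

-- ===== VERDICT (by name: the statement is the Claim_ definition above) =====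
theorem remsubstr_spec : Claim_equal_remsubstr := by
  intro s rem points _hdom hpre
  unfold Spec_remsubstr
  obtain ⟨x, y, t, hrem⟩ : ∃ x y t, rem.toList = x :: y :: t := by
    unfold Pre_remsubstr at hpre
    cases hl : rem.toList with
    | nil => rw [hl] at hpre; simp at hpre
    | cons a l =>
      cases l with
      | nil => rw [hl] at hpre; simp at hpre
      | cons b l' => exact ⟨a, b, l', rfl⟩
  obtain ⟨hg0, hg1⟩ := rem_get01 rem x y t hrem
  have hA : remsubstr s rem points =
      (String.ofList (remAltLoop x y s.toList),
       (((s.toList.length - (remAltLoop x y s.toList).length) / 2 : Nat) : Int) * points) := by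
    unfold remsubstr
    rw [foldA_eq_stepA s rem points x y t hrem,
      foldA_loop_aux points x y s.toList.length s.toList le_rfl 0]
    simp
  have hB : remsubstr_alt s rem points =
      (String.ofList (remAltLoop x y s.toList),
       PySem.Int.floordiv ((s.toList.length : Int) - ((remAltLoop x y s.toList).length : Int)) 2
         * points) := by
    unfold remsubstr_alt
    rw [hg0, hg1]
    simp [PySem.Str.len_eq]
  rw [hA, hB]
  have hle := remAltLoop_length_le x y s.toList
  have hcast : ((s.toList.length : Int) - ((remAltLoop x y s.toList).length : Int)) =
      ((s.toList.length - (remAltLoop x y s.toList).length : Nat) : Int) := by omega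
  rw [hcast, show (2:Int) = ((2:Nat):Int) from rfl, PySem.Int.floordiv_natCast]
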